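-- pv_equiv track=rewrite | github.com/clairebub/usaco | teachers_manual/w7/w7_8.py | parse_eudora_number
-- ===== SOURCE A (Python) =====
-- def parse_eudora_number(s):
--   # return the number represented in eudora system
--   # housands t, hundreds h, tens n, or units u
--   # for example, 32h7u (32 hundreds and 7 units)
--   eudura = {'t': 1000, 'h': 100, 'n': 10, 'u': 1}
--   num = 0
--   start_index = 0
--   for i in range(len(s)):
--     if s[i] in eudura:
--       num += int(s[start_index:i]) * eudura[s[i]]
--       start_index = i + 1
--       i += 1
--   return num
-- ===== SOURCE B (Python) =====
-- def parse_eudora_number(s):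
--   # Tokenize first (value-string, letter) pairs, then sum the products.
--   eudura = {'t': 1000, 'h': 100, 'n': 10, 'u': 1}
--   parts = []
--   tok = []
--   for c in s:
--     if c in eudura:
--       parts.append((''.join(tok), c))
--       tok = []
--     else:
--       tok.append(c)
--   return sum(int(d) * eudura[l] for d, l in parts)
-- ===== Notes on version B (the rewrite author's own statement) =====
-- stated objective: idiomatic
-- what changed: B tokenizes the string once into (number-string, letter) pairs and sums int(d)*value over them, replacing A's index loop that tracks a running start_index and re-slices the string at every letter.
import Mathlib
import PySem

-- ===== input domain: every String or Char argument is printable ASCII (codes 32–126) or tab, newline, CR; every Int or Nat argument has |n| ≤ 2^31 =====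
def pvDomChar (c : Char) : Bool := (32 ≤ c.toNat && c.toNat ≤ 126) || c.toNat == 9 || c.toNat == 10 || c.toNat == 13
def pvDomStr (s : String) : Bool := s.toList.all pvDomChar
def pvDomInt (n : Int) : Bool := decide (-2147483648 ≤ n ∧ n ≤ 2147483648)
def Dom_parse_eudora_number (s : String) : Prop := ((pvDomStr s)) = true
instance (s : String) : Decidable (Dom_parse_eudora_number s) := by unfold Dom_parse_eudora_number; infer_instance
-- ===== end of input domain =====

-- B tokenizes the string into (digits, letter) pairs first and then sums the products,
-- instead of A's index loop with a running start_index and slicing; objective: simpler/idiomatic.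

-- the dict literal {'t': 1000, 'h': 100, 'n': 10, 'u': 1} both sources define
def pvEud : PySem.Dict Char Int :=
  PySem.Dict.ofList [('t', 1000), ('h', 100), ('n', 10), ('u', 1)]

-- ===== PORT A =====
-- loop body of A: state = (num, start_index), loop variable i
def pvStepA (cs : List Char) (st : Int × Int) (i : Int) : Int × Int :=
  match PySem.List.pyGet? cs i with
  | some c =>
    if PySem.Dict.contains pvEud c then
      (st.1 + (PySem.Int.ofChars? (PySem.List.slice cs (some st.2) (some i))).getD 0
            * PySem.Dict.getD pvEud c 0, i + 1)
    else st
  | none => st   -- unreachable: i ∈ range(len(s))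

def parse_eudora_number (s : String) : Int :=
  let cs := s.toList
  ((PySem.List.pyRange 0 cs.length 1).foldl (pvStepA cs) (0, 0)).1

-- ===== PORT B =====
-- loop body of B: state = (parts, tok)
def pvStepB (st : List (List Char × Char) × List Char) (c : Char) :
    List (List Char × Char) × List Char :=
  if PySem.Dict.contains pvEud c then (st.1 ++ [(st.2, c)], [])
  else (st.1, st.2 ++ [c])

def pvTerm (p : List Char × Char) : Int :=
  (PySem.Int.ofChars? p.1).getD 0 * PySem.Dict.getD pvEud p.2 0

def parse_eudora_number_alt (s : String) : Int :=
  ((s.toList.foldl pvStepB ([], [])).1.map pvTerm).sum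

-- ===== PRECONDITION & SPEC =====
-- the maximal letter-free run of characters just before position k
def pvSeg (cs : List Char) (k : Nat) : List Char :=
  ((cs.take k).reverse.takeWhile (fun c => !(PySem.Dict.contains pvEud c))).reverse

-- Pre_ excludes exactly the inputs on which A raises ValueError: some run of characters
-- immediately preceding one of the letters t/h/n/u is not a valid int() literal (e.g. empty).
def Pre_parse_eudora_number (s : String) : Prop :=
  ∀ k, (hk : k < s.toList.length) → PySem.Dict.contains pvEud s.toList[k] →
    (PySem.Int.ofChars? (pvSeg s.toList k)).isSome = true
instance (s : String) : Decidable (Pre_parse_eudora_number s) := by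
  unfold Pre_parse_eudora_number; infer_instance

def pvWitness_parse_eudora_number : String := "32h7u"

def Spec_parse_eudora_number (s : String) (out : Int) : Prop := out = parse_eudora_number_alt s
instance (s : String) (out : Int) : Decidable (Spec_parse_eudora_number s out) := by unfold Spec_parse_eudora_number; infer_instance

-- ===== CLAIM (what is proved, stated in full; the proofs are below) =====
def Claim_equal_parse_eudora_number : Prop := ∀ (s : String), Dom_parse_eudora_number s → Pre_parse_eudora_number s → Spec_parse_eudora_number s (parse_eudora_number s)

-- ===== LEMMAS AND PROOFS =====

-- common reference recursion: process remaining chars with pending token tok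
def pvGo : List Char → List Char → Int
  | [], _ => 0
  | c :: rest, tok =>
    if PySem.Dict.contains pvEud c then
      (PySem.Int.ofChars? tok).getD 0 * PySem.Dict.getD pvEud c 0 + pvGo rest []
    else pvGo rest (tok ++ [c])

lemma pvB_loop (cs : List Char) (parts : List (List Char × Char)) (tok : List Char) :
    ((cs.foldl pvStepB (parts, tok)).1.map pvTerm).sum
      = (parts.map pvTerm).sum + pvGo cs tok := by
  induction cs generalizing parts tok with
  | nil => simp [pvGo]
  | cons c rest ih =>
    simp only [List.foldl_cons, pvStepB, pvGo]
    by_cases h : PySem.Dict.contains pvEud c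
    · simp only [h, if_true]
      rw [ih]
      simp [pvTerm]
      ring
    · simp only [h, Bool.false_eq_true, if_false]
      rw [ih]

lemma pvA_loop (cs : List Char) (d i start : Nat) (num : Int)
    (hd : cs.length - i = d) (hs : start ≤ i) (hi : i ≤ cs.length) :
    ((PySem.List.pyRange (i : Int) (cs.length : Int) 1).foldl (pvStepA cs) (num, (start : Int))).1
      = num + pvGo (cs.drop i) ((cs.drop start).take (i - start)) := by
  induction d generalizing i start num with
  | zero =>
    have hlen : i = cs.length := by omega
    rw [PySem.List.pyRange_one_eq_nil (by omega)]
    simp [hlen, pvGo]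
  | succ d ih =>
    have hlt : i < cs.length := by omega
    rw [PySem.List.pyRange_one_cons (by exact_mod_cast hlt)]
    rw [List.foldl_cons]
    have hget : PySem.List.pyGet? cs (i : Int) = some cs[i] := by
      rw [PySem.List.pyGet?_natCast]
      simp [List.getElem?_eq_getElem hlt]
    have hdrop : cs.drop i = cs[i] :: cs.drop (i + 1) := by
      rw [List.drop_eq_getElem_cons hlt]
    by_cases h : PySem.Dict.contains pvEud cs[i]
    · simp only [pvStepA, hget, h, if_true]
      have h1 : ((i : Int) + 1) = ((i + 1 : Nat) : Int) := by push_cast; ring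
      rw [h1]
      rw [ih (i + 1) (i + 1) _ (by omega) (by omega) (by omega)]
      rw [hdrop]
      simp only [pvGo, h, if_true]
      rw [PySem.List.slice_natCast]
      simp
      ring
    · simp only [pvStepA, hget, h, Bool.false_eq_true, if_false]
      have h1 : ((i : Int) + 1) = ((i + 1 : Nat) : Int) := by push_cast; ring
      rw [h1]
      rw [ih (i + 1) start _ (by omega) (by omega) (by omega)]
      rw [hdrop]
      simp only [pvGo, h, Bool.false_eq_true, if_false]
      have htake : (cs.drop start).take (i + 1 - start)
          = (cs.drop start).take (i - start) ++ [cs[i]] := by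
        have h2 : i + 1 - start = (i - start) + 1 := by omega
        rw [h2, List.take_add_one]
        have h3 : (cs.drop start)[i - start]? = some cs[i] := by
          rw [List.getElem?_drop]
          rw [List.getElem?_eq_getElem (by omega)]
          congr 1
          congr 1
          omega
        rw [h3]
        rfl
      rw [htake]

-- ===== VERDICT (by name: the statement is the Claim_ definition above) =====
theorem parse_eudora_number_spec : Claim_equal_parse_eudora_number := by
  intro s _ _
  unfold Spec_parse_eudora_number parse_eudora_number parse_eudora_number_alt
  have hA := pvA_loop s.toList s.toList.length 0 0 0 (by omega) (by omega) (by omega)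
  have hB := pvB_loop s.toList [] []
  simp only [Nat.cast_zero] at hA
  simp only [Nat.sub_zero, List.drop_zero, List.take_zero] at hA
  simp only [List.map_nil, List.sum_nil, zero_add] at hB
  rw [hA, hB]
  simp
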